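-- pv_equiv track=rewrite | github.com/galacticue06/expression_evaluater | parse.py | find
-- ===== SOURCE A (Python) =====
-- alph = ['a', 'b', 'c', 'd', 'e', 'f', 'g', 'h', 'i', 'j', 'k', 'l', 'm', 'n', 'o', 'p', 'q', 'r', 's', 't', 'u', 'v', 'w', 'x', 'y', 'z']
--
-- def find(string):
--     con = []
--     fun = []
--     seq = ""
--     tog = 0
--     for i in range(len(string)):
--         c = string[i]
--         if c in alph or c.lower() in alph:
--             tog = 1
--             seq += c
--         else:
--             if tog:
--                 acs = 1
--                 try:
--                     if c == "(":
--                         acs = 0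
--                 except:
--                     pass
--                 if acs:
--                     if not seq in con:
--                         con.append(seq)
--                 else:
--                     if not seq in fun:
--                         fun.append(seq)
--                 seq = ""
--                 tog = 0
--     if seq!="":
--         if not seq in con:
--             con.append(seq)
--     return con,fun
-- ===== SOURCE B (Python) =====
-- def find(string):
--     # Scan maximal runs of letters with an index-jumping two-pointer loop;
--     # classify each run by the character that follows it (lookahead), no state machine.
--     con = []
--     fun = []
--     i = 0
--     n = len(string)
--     while i < n:
--         if string[i].isalpha():
--             j = i
--             while j < n and string[j].isalpha():
--                 j += 1
--             name = string[i:j]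
--             target = fun if j < n and string[j] == "(" else con
--             if name not in target:
--                 target.append(name)
--             i = j
--         else:
--             i += 1
--     return con, fun
-- ===== Notes on version B (the rewrite author's own statement) =====
-- stated objective: idiomatic
-- what changed: Replaces the char-by-char tog/seq accumulator state machine (with a trailing flush) by a two-pointer scan that extracts each maximal run of letters as a slice and classifies it by one-character lookahead.
import Mathlib
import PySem

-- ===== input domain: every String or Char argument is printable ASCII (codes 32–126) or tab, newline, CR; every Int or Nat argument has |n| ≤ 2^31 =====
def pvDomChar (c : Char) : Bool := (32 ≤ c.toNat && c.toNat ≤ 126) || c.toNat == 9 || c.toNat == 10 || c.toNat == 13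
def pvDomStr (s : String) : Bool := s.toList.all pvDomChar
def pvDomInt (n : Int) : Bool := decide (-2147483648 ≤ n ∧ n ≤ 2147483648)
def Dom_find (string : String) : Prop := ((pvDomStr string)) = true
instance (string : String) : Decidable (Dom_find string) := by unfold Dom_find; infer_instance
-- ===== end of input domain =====

-- B replaces A's char-by-char tog/seq accumulator state machine by a two-pointer
-- maximal-run scan with one-character lookahead (idiomatic token extraction).


-- ===== PORT A =====
def alph : List Char :=
  ['a','b','c','d','e','f','g','h','i','j','k','l','m',
   'n','o','p','q','r','s','t','u','v','w','x','y','z']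

-- A's letter test `c in alph or c.lower() in alph`; PySem.Chars.lowerChar is
-- Python str.lower on one char, exact on the stated ASCII domain.
def aLetter (c : Char) : Bool := decide (c ∈ alph) || decide (PySem.Chars.lowerChar c ∈ alph)

-- A's for-loop over the characters with state (con, fun, seq, tog); seq is kept as
-- its list of characters and materialised with String.mk exactly where A uses it.
def findGo : List Char → List String → List String → List Char → Bool → List String × List String
  | [], con, fn, seq, _ =>
      if seq ≠ [] then
        (if String.mk seq ∈ con then con else con ++ [String.mk seq], fn)
      else (con, fn)
  | c :: rest, con, fn, seq, tog =>
      if aLetter c then findGo rest con fn (seq ++ [c]) true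
      else if tog then
        if c = '(' then
          findGo rest con (if String.mk seq ∈ fn then fn else fn ++ [String.mk seq]) [] false
        else
          findGo rest (if String.mk seq ∈ con then con else con ++ [String.mk seq]) fn [] false
      else findGo rest con fn seq tog

def find (string : String) : List String × List String :=
  findGo string.toList [] [] [] false

-- ===== PORT B =====
-- B's letter test is Python str.isalpha on one char (PySem.Chars.isalpha, exact on
-- the stated ASCII domain).  Two-pointer scan: grab the maximal letter run
-- (the inner `while j` loop = takeWhile/dropWhile), classify it by the character
-- right after it (lookahead, not consumed), continue at the run's end.
def findAltGo : List Char → List String → List String → List String × List String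
  | [], con, fn => (con, fn)
  | c :: rest, con, fn =>
      if PySem.Chars.isalpha c then
        let name := String.mk (c :: rest.takeWhile PySem.Chars.isalpha)
        let rest' := rest.dropWhile PySem.Chars.isalpha
        if rest'.head? = some '(' then
          findAltGo rest' con (if name ∈ fn then fn else fn ++ [name])
        else
          findAltGo rest' (if name ∈ con then con else con ++ [name]) fn
      else findAltGo rest con fn
  termination_by cs => cs.length
  decreasing_by
    · exact Nat.lt_succ_of_le (List.length_dropWhile_le _ _)
    · exact Nat.lt_succ_of_le (List.length_dropWhile_le _ _)
    · simp

def find_alt (string : String) : List String × List String :=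
  findAltGo string.toList [] []

-- ===== PRECONDITION & SPEC =====
def Spec_find (string : String) (out : List String × List String) : Prop := out = find_alt string
instance (string : String) (out : List String × List String) : Decidable (Spec_find string out) := by unfold Spec_find; infer_instance

-- ===== CLAIM (what is proved, stated in full; the proofs are below) =====
def Claim_equal_find : Prop := ∀ (string : String), Dom_find string → Spec_find string (find string)

-- ===== LEMMAS AND PROOFS =====

lemma char_ofNat_toNat (n : Nat) (h : n.isValidChar) : (Char.ofNat n).toNat = n := by
  unfold Char.ofNat; simp [Char.ofNatAux, h, Char.toNat]

lemma mem_alph_iff (x : Char) : (x ∈ alph) ↔ (97 ≤ x.toNat ∧ x.toNat ≤ 122) := by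
  simp [alph, Char.ext_iff, UInt32.ext_iff]
  omega

lemma upper_iff (x : Char) : PySem.Chars.isupper x = true ↔ (65 ≤ x.toNat ∧ x.toNat ≤ 90) := by
  simp [PySem.Chars.isupper, Char.le_def, UInt32.le_iff_toNat_le]

-- the two letter predicates agree on every Char (lowerChar is the ASCII lowering)
lemma aLetter_eq_isalpha (c : Char) : aLetter c = PySem.Chars.isalpha c := by
  have hval : PySem.Chars.isalpha c = (PySem.Chars.isupper c || PySem.Chars.islower c) := by
    simp [PySem.Chars.isalpha]
  rw [hval]
  by_cases hu : PySem.Chars.isupper c = true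
  · have hr := (upper_iff c).1 hu
    have hv : (c.toNat + 32).isValidChar := Or.inl (by omega)
    have hlc : PySem.Chars.lowerChar c = Char.ofNat (c.toNat + 32) := by
      simp [PySem.Chars.lowerChar, hu]
    have hmem : PySem.Chars.lowerChar c ∈ alph := by
      rw [hlc, mem_alph_iff, char_ofNat_toNat _ hv]; omega
    simp [aLetter, hmem, hu]
  · have hlc : PySem.Chars.lowerChar c = c := by
      simp [PySem.Chars.lowerChar, hu]
    simp [aLetter, hlc, hu, mem_alph_iff, PySem.Chars.islower, Char.le_def,
      UInt32.le_iff_toNat_le]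

-- what A's loop does from a 'mid-run' state (tog = 1, pending nonempty seq):
-- it finishes the current letter run, classifies seq ++ run by the next character,
-- and restarts with empty seq (the end-of-string flush is the 'else' with empty tail).
lemma findGo_run (cs : List Char) : ∀ (seq : List Char) (con fn : List String), seq ≠ [] →
    findGo cs con fn seq true =
      (if ((cs.dropWhile PySem.Chars.isalpha).head? = some '(') then
        findGo (cs.dropWhile PySem.Chars.isalpha).tail con
          (if String.mk (seq ++ cs.takeWhile PySem.Chars.isalpha) ∈ fn then fn
           else fn ++ [String.mk (seq ++ cs.takeWhile PySem.Chars.isalpha)]) [] false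
      else
        findGo (cs.dropWhile PySem.Chars.isalpha).tail
          (if String.mk (seq ++ cs.takeWhile PySem.Chars.isalpha) ∈ con then con
           else con ++ [String.mk (seq ++ cs.takeWhile PySem.Chars.isalpha)]) fn [] false) := by
  induction cs with
  | nil => intro seq con fn h; simp [findGo, h]
  | cons c rest ih =>
    intro seq con fn h
    by_cases hc : PySem.Chars.isalpha c = true
    · have ha : aLetter c = true := by rw [aLetter_eq_isalpha]; exact hc
      rw [findGo, if_pos ha, ih (seq ++ [c]) con fn (by simp),
        List.takeWhile_cons_of_pos hc, List.dropWhile_cons_of_pos hc]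
      simp
    · have ha : aLetter c = false := by rw [aLetter_eq_isalpha]; simpa using hc
      rw [findGo, if_neg (by simp [ha]), if_pos rfl,
        List.takeWhile_cons_of_neg (by simpa using hc),
        List.dropWhile_cons_of_neg (by simpa using hc)]
      simp

lemma findAltGo_cons_alpha (c : Char) (rest : List Char) (con fn : List String)
    (hc : PySem.Chars.isalpha c = true) :
    findAltGo (c :: rest) con fn =
      (if (rest.dropWhile PySem.Chars.isalpha).head? = some '(' then
        findAltGo (rest.dropWhile PySem.Chars.isalpha) con
          (if String.mk (c :: rest.takeWhile PySem.Chars.isalpha) ∈ fn then fn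
           else fn ++ [String.mk (c :: rest.takeWhile PySem.Chars.isalpha)])
      else
        findAltGo (rest.dropWhile PySem.Chars.isalpha)
          (if String.mk (c :: rest.takeWhile PySem.Chars.isalpha) ∈ con then con
           else con ++ [String.mk (c :: rest.takeWhile PySem.Chars.isalpha)]) fn) := by
  rw [findAltGo]; simp [hc]

lemma findAltGo_cons_nonalpha (c : Char) (rest : List Char) (con fn : List String)
    (hc : PySem.Chars.isalpha c = false) :
    findAltGo (c :: rest) con fn = findAltGo rest con fn := by
  rw [findAltGo]; simp [hc]

lemma findGo_eq_altGo (n : Nat) : ∀ cs : List Char, cs.length ≤ n →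
    ∀ con fn : List String, findGo cs con fn [] false = findAltGo cs con fn := by
  induction n with
  | zero =>
    intro cs h con fn
    have : cs = [] := List.eq_nil_of_length_eq_zero (Nat.le_zero.1 h)
    subst this; simp [findGo, findAltGo]
  | succ n ih =>
    intro cs h con fn
    match cs with
    | [] => simp [findGo, findAltGo]
    | c :: rest =>
      have hrest : rest.length ≤ n := by simpa using h
      by_cases hc : PySem.Chars.isalpha c = true
      · have ha : aLetter c = true := by rw [aLetter_eq_isalpha]; exact hc
        rw [findGo, if_pos ha, show ([] : List Char) ++ [c] = [c] from rfl,
          findGo_run rest [c] con fn (by simp), findAltGo_cons_alpha c rest con fn hc]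
        cases hdw : rest.dropWhile PySem.Chars.isalpha with
        | nil => simp [findGo, findAltGo]
        | cons d r =>
          have hd : PySem.Chars.isalpha d = false := by
            have := List.head_dropWhile_not (p := PySem.Chars.isalpha) (l := rest)
              (w := by simp [hdw])
            simpa [hdw] using this
          have hr : r.length ≤ n := by
            have := List.length_dropWhile_le PySem.Chars.isalpha rest
            rw [hdw] at this; simp at this; omega
          simp only [List.head?_cons, List.tail_cons]
          by_cases hp : d = '('
          · subst hp
            rw [if_pos rfl, if_pos rfl, findAltGo_cons_nonalpha _ _ _ _ (by decide)]
            exact ih r hr _ _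
          · have hne : ¬ (some d = some '(') := fun hh => hp (Option.some.inj hh)
            rw [if_neg hne, if_neg hne, findAltGo_cons_nonalpha _ _ _ _ hd]
            exact ih r hr _ _
      · have ha : aLetter c = false := by rw [aLetter_eq_isalpha]; simpa using hc
        rw [findGo, if_neg (by simp [ha]), if_neg (by simp),
          findAltGo_cons_nonalpha _ _ _ _ (by simpa using hc)]
        exact ih rest hrest con fn

-- ===== VERDICT (by name: the statement is the Claim_ definition above) =====
theorem find_spec : Claim_equal_find := by
  intro string _
  unfold Spec_find find find_alt
  exact findGo_eq_altGo string.toList.length string.toList (Nat.le_refl _) [] []
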